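-- pv_equiv track=rewrite | github.com/FeChiste/Crud | pythonn/Exercicios repetição.py | verificar_numero_quase_perfeito
-- ===== SOURCE A (Python) =====
-- def verificar_numero_quase_perfeito(num):
--     for i in range(1, num):
--         soma_divisores = 0
--         if num % i == 0:
--             soma_divisores += i
--             for j in range(i + 1, num):
--                 if num % j == 0:
--                     soma_divisores += j
--                 if soma_divisores == num:
--                     return True
--     return False
-- ===== SOURCE B (Python) =====
-- def verificar_numero_quase_perfeito(num):
--     # Collect the proper divisors once (one pass), then scan contiguous runs
--     # of that small sorted list instead of re-scanning the whole range per divisor.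
--     divs = [d for d in range(1, num) if num % d == 0]
--     rem = divs
--     while rem:
--         d, rem = rem[0], rem[1:]
--         s = d
--         for e in rem:
--             s += e
--             if s == num:
--                 return True
--     return False
-- ===== Notes on version B (the rewrite author's own statement) =====
-- stated objective: faster
-- what changed: B builds the sorted list of proper divisors in one pass and checks contiguous-run sums over that small list, so A's full inner range scan per divisor disappears.
import Mathlib
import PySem

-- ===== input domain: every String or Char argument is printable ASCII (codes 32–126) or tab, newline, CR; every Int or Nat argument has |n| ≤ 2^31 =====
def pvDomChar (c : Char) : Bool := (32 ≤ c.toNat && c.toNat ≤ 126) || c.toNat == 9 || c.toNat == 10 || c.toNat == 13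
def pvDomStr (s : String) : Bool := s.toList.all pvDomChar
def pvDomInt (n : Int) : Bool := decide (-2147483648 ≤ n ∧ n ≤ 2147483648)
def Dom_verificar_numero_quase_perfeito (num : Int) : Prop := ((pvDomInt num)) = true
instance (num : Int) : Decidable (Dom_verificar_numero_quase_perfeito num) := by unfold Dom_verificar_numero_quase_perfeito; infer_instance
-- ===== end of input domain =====

-- B builds the proper-divisor list in one pass and checks contiguous-run sums over
-- that small list, instead of A's full inner range scan per divisor (return value only).

-- ===== PORT A =====
-- inner loop: 'for j in range(i+1, num): if num % j == 0: soma += j; if soma == num: return True'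
def pvInnerA (num soma : Int) : List Int → Bool
  | [] => false
  | j :: js =>
    let s := if PySem.Int.mod num j == 0 then soma + j else soma
    if s == num then true else pvInnerA num s js

-- outer loop: 'for i in range(1, num): soma = 0; if num % i == 0: soma += i; <inner>'
def pvOuterA (num : Int) : List Int → Bool
  | [] => false
  | i :: is =>
    if PySem.Int.mod num i == 0 then
      if pvInnerA num (0 + i) (PySem.List.pyRange (i + 1) num 1) then true
      else pvOuterA num is
    else pvOuterA num is

def verificar_numero_quase_perfeito (num : Int) : Bool :=
  pvOuterA num (PySem.List.pyRange 1 num 1)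

-- ===== PORT B =====
-- 'for e in rem: s += e; if s == num: return True'
def pvInnerB (num s : Int) : List Int → Bool
  | [] => false
  | e :: es =>
    let s' := s + e
    if s' == num then true else pvInnerB num s' es

-- 'while rem: d, rem = rem[0], rem[1:]; s = d; <inner>'
def pvOuterB (num : Int) : List Int → Bool
  | [] => false
  | d :: rem => if pvInnerB num d rem then true else pvOuterB num rem

def verificar_numero_quase_perfeito_alt (num : Int) : Bool :=
  pvOuterB num ((PySem.List.pyRange 1 num 1).filter (fun d => PySem.Int.mod num d == 0))

-- ===== PRECONDITION & SPEC =====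
def Spec_verificar_numero_quase_perfeito (num : Int) (out : Bool) : Prop := out = verificar_numero_quase_perfeito_alt num
instance (num : Int) (out : Bool) : Decidable (Spec_verificar_numero_quase_perfeito num out) := by unfold Spec_verificar_numero_quase_perfeito; infer_instance

-- ===== CLAIM (what is proved, stated in full; the proofs are below) =====
def Claim_equal_verificar_numero_quase_perfeito : Prop := ∀ (num : Int), Dom_verificar_numero_quase_perfeito num → Spec_verificar_numero_quase_perfeito num (verificar_numero_quase_perfeito num)

-- ===== LEMMAS AND PROOFS =====

-- A's inner scan over an arbitrary list equals B's scan over its divisor filter,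
-- provided the running sum does not already equal num.
theorem pvInnerA_eq_filter (num : Int) (l : List Int) :
    ∀ s : Int, s ≠ num →
      pvInnerA num s l = pvInnerB num s (l.filter (fun j => PySem.Int.mod num j == 0)) := by
  induction l with
  | nil => intro s _; simp [pvInnerA, pvInnerB]
  | cons j js ih =>
    intro s hs
    by_cases hdiv : PySem.Int.mod num j == 0
    · by_cases heq : s + j == num
      · simp [pvInnerA, pvInnerB, hdiv, heq]
      · have hne : s + j ≠ num := by simpa using heq
        simp [pvInnerA, pvInnerB, hdiv, heq, ih (s + j) hne]
    · have hsb : (s == num) = false := by simpa using hs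
      simp [pvInnerA, hdiv, hsb, ih s hs]

-- A's outer scan over range(k, num) equals B's scan over the filtered range.
theorem pvOuterA_eq_filter (num : Int) :
    ∀ (n : Nat) (k : Int), n = (num - k).toNat →
      pvOuterA num (PySem.List.pyRange k num 1) =
        pvOuterB num ((PySem.List.pyRange k num 1).filter (fun j => PySem.Int.mod num j == 0)) := by
  intro n
  induction n with
  | zero =>
    intro k hk
    have hle : num ≤ k := by omega
    rw [PySem.List.pyRange_one_eq_nil hle]
    simp [pvOuterA, pvOuterB]
  | succ m ih =>
    intro k hk
    have hlt : k < num := by omega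
    rw [PySem.List.pyRange_one_cons hlt]
    have ihk := ih (k + 1) (by omega)
    by_cases hdiv : PySem.Int.mod num k == 0
    · have hne : (0 : Int) + k ≠ num := by omega
      have hinner := pvInnerA_eq_filter num (PySem.List.pyRange (k + 1) num 1) ((0 : Int) + k) hne
      have h0k : (0 : Int) + k = k := by ring
      rw [h0k] at hinner
      by_cases hin : pvInnerB num k ((PySem.List.pyRange (k + 1) num 1).filter
          (fun j => PySem.Int.mod num j == 0)) = true
      · simp [pvOuterA, pvOuterB, hdiv, hinner, hin]
      · simp only [Bool.not_eq_true] at hin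
        simp [pvOuterA, pvOuterB, hdiv, hinner, hin, ihk]
    · simp [pvOuterA, hdiv, ihk]

-- ===== VERDICT (by name: the statement is the Claim_ definition above) =====
theorem verificar_numero_quase_perfeito_spec : Claim_equal_verificar_numero_quase_perfeito := by
  intro num _
  unfold Spec_verificar_numero_quase_perfeito verificar_numero_quase_perfeito verificar_numero_quase_perfeito_alt
  exact pvOuterA_eq_filter num (num - 1).toNat 1 rfl
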